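-- pv_equiv track=rewrite | github.com/Py1onn/Yone-Optimization | Yone item/WeightBuild.py | top_items_for_stats
-- ===== SOURCE A (Python) =====
-- def top_items_for_stats(league_items, initial_stats):
--
--     stat_keys = ["HP", "AS", "AD", "AR", "MR", "CC", "CD", "HR", "H", "LS", "L", "ARP", "A"]
--     max_values = []
--
--     for stat in stat_keys:
--         sorted_items = sorted(
--             league_items.items(), key=lambda item: item[1].get(stat, 0), reverse=True
--         )
--
--         excluded_items = {"Mortal Reminder", "Black Cleaver", "Lord Dominik's Regards"}
--         selected_items = []
--
--         for item in sorted_items: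
--             if item[0] in excluded_items:
--                 if not any(ex_item in selected_items for ex_item in excluded_items):
--                     selected_items.append(item[0])
--             else:
--                 selected_items.append(item[0])
--
--
--         top_5_items = selected_items[:5]
--
--         total_value_from_items = sum(
--             league_items[item][stat] if stat in league_items[item] else 0 for item in top_5_items
--         )
--
--         total_value = total_value_from_items + initial_stats.get(stat, 0)
--
--         max_values.append(total_value)
--
--     return tuple(max_values)
-- ===== SOURCE B (Python) =====
-- EXCLUDED = {"Mortal Reminder", "Black Cleaver", "Lord Dominik's Regards"}
-- STAT_KEYS = ["HP", "AS", "AD", "AR", "MR", "CC", "CD", "HR", "H", "LS", "L", "ARP", "A"]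
--
--
-- def _stat_total(league_items, initial_stats, stat):
--     excl_vals = [stats.get(stat, 0) for name, stats in league_items.items() if name in EXCLUDED]
--     pool = [stats.get(stat, 0) for name, stats in league_items.items() if name not in EXCLUDED]
--     if excl_vals:
--         pool.append(max(excl_vals))
--     pool.sort(reverse=True)
--     return sum(pool[:5]) + initial_stats.get(stat, 0)
--
--
-- def top_items_for_stats(league_items, initial_stats):
--     return tuple(_stat_total(league_items, initial_stats, stat) for stat in STAT_KEYS)
-- ===== Notes on version B (the rewrite author's own statement) =====
-- stated objective: simpler
-- what changed: B drops A's per-stat name-list machinery (sort all items, dedup the three excluded names by rescanning the selected list, slice names, re-look each name up in the dict) and works on values only: partition the stat values into excluded/rest, append the max excluded value to the rest, sort the values descending and sum the first five plus the initial stat.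
import Mathlib
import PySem

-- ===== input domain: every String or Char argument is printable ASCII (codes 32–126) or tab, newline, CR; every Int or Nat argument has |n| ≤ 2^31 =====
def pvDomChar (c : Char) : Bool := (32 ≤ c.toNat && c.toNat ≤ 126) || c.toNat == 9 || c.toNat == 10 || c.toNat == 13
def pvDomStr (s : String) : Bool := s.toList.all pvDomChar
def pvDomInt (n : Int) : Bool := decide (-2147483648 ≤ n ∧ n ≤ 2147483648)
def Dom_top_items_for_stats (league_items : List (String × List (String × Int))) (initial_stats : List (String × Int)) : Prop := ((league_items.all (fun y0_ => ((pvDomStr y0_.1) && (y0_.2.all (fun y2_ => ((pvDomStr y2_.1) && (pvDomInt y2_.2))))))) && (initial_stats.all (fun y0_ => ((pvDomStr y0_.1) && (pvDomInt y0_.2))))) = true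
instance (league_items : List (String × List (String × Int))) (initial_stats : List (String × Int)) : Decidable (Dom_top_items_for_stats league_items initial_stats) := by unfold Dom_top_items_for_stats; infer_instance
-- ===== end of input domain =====

-- B replaces A's per-stat name-list build (sort all items, dedup the excluded names by scanning the
-- selected list, take 5 names, re-look each name up in the dict) by pure value arithmetic: partition the
-- values into excluded/rest, add max of the excluded values to the rest, sort the values, sum the top 5.
-- Objective: simpler (no name lists, no dict re-lookup); equivalence is about the return value only.

-- ===== PORT A =====
def top_items_for_stats (league_items : List (String × List (String × Int))) (initial_stats : List (String × Int)) : List Int :=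
  let stat_keys : List String := ["HP", "AS", "AD", "AR", "MR", "CC", "CD", "HR", "H", "LS", "L", "ARP", "A"]
  stat_keys.foldl (fun max_values stat =>
    let sorted_items := PySem.List.sorted league_items (fun item => PySem.Dict.getD (PySem.Dict.mk item.2) stat 0) true
    let excluded_items : PySem.Set String := PySem.Set.ofList ["Mortal Reminder", "Black Cleaver", "Lord Dominik's Regards"]
    let selected_items := sorted_items.foldl (fun selected item =>
      if PySem.Set.contains excluded_items item.1 then
        if !(excluded_items.any (fun ex_item => selected.contains ex_item)) then selected ++ [item.1]
        else selected
      else selected ++ [item.1]) ([] : List String)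
    let top_5_items := PySem.List.slice selected_items none (some 5)
    -- league_items[item] cannot raise here (every selected name is a key); '.getD []' is that unreachable branch
    let total_value_from_items := (top_5_items.map (fun item =>
      let d := (PySem.Dict.get? (PySem.Dict.mk league_items) item).getD []
      if (PySem.Dict.mk d).contains stat then PySem.Dict.getD (PySem.Dict.mk d) stat 0 else 0)).sum
    let total_value := total_value_from_items + PySem.Dict.getD (PySem.Dict.mk initial_stats) stat 0
    max_values ++ [total_value]) []

-- ===== PORT B =====
def pvExcludedB : PySem.Set String := PySem.Set.ofList ["Mortal Reminder", "Black Cleaver", "Lord Dominik's Regards"]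
def pvStatKeysB : List String := ["HP", "AS", "AD", "AR", "MR", "CC", "CD", "HR", "H", "LS", "L", "ARP", "A"]

def pvStatTotal (league_items : List (String × List (String × Int))) (initial_stats : List (String × Int)) (stat : String) : Int :=
  let exclVals := (league_items.filter (fun p => PySem.Set.contains pvExcludedB p.1)).map
    (fun p => PySem.Dict.getD (PySem.Dict.mk p.2) stat 0)
  let pool0 := (league_items.filter (fun p => !PySem.Set.contains pvExcludedB p.1)).map
    (fun p => PySem.Dict.getD (PySem.Dict.mk p.2) stat 0)
  let pool := match PySem.List.max? exclVals (fun v => v) with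
    | some m => pool0 ++ [m]
    | none => pool0
  (PySem.List.slice (PySem.List.sorted pool (fun v => v) true) none (some 5)).sum
    + PySem.Dict.getD (PySem.Dict.mk initial_stats) stat 0

def top_items_for_stats_alt (league_items : List (String × List (String × Int))) (initial_stats : List (String × Int)) : List Int :=
  pvStatKeysB.map (pvStatTotal league_items initial_stats)

-- ===== PRECONDITION & SPEC =====
-- Pre_ excludes association lists with duplicate item names: a Python dict argument always has distinct
-- keys, so such lists do not encode any call of the Python A at all.
def Pre_top_items_for_stats (league_items : List (String × List (String × Int))) (initial_stats : List (String × Int)) : Prop :=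
  (league_items.map Prod.fst).Nodup
instance (league_items : List (String × List (String × Int))) (initial_stats : List (String × Int)) : Decidable (Pre_top_items_for_stats league_items initial_stats) := by unfold Pre_top_items_for_stats; infer_instance

def pvWitness_top_items_for_stats : (List (String × List (String × Int))) × (List (String × Int)) :=
  ([("Infinity Edge", [("AD", 70), ("CC", 20)]), ("Mortal Reminder", [("AD", 35)]), ("Black Cleaver", [("AD", 40), ("HP", 350)])], [("AD", 60)])

def Spec_top_items_for_stats (league_items : List (String × List (String × Int))) (initial_stats : List (String × Int)) (out : List Int) : Prop := out = top_items_for_stats_alt league_items initial_stats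
instance (league_items : List (String × List (String × Int))) (initial_stats : List (String × Int)) (out : List Int) : Decidable (Spec_top_items_for_stats league_items initial_stats out) := by unfold Spec_top_items_for_stats; infer_instance

-- ===== CLAIM (what is proved, stated in full; the proofs are below) =====
def Claim_equal_top_items_for_stats : Prop := ∀ (league_items : List (String × List (String × Int))) (initial_stats : List (String × Int)), Dom_top_items_for_stats league_items initial_stats → Pre_top_items_for_stats league_items initial_stats → Spec_top_items_for_stats league_items initial_stats (top_items_for_stats league_items initial_stats)

-- ===== LEMMAS AND PROOFS =====

-- the residue of A's dedup loop over pairs: keep every non-excluded pair, and the first excluded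
-- pair unless the flag says one was already kept
def pvKeep {α : Type} (E : α → Bool) : List α → Bool → List α
  | [], _ => []
  | p :: t, flag =>
    if E p then (if flag then pvKeep E t true else p :: pvKeep E t true)
    else p :: pvKeep E t flag

theorem pvKeep_true {α : Type} (E : α → Bool) (l : List α) :
    pvKeep E l true = l.filter (fun p => !E p) := by
  induction l with
  | nil => rfl
  | cons p t ih => by_cases h : E p = true <;> simp [pvKeep, h, ih]

theorem pvKeep_sublist {α : Type} (E : α → Bool) (l : List α) (flag : Bool) :
    (pvKeep E l flag).Sublist l := by
  induction l generalizing flag with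
  | nil => simp [pvKeep]
  | cons p t ih =>
    by_cases h : E p = true
    · cases flag <;> simp only [pvKeep, h, if_true, if_false, Bool.false_eq_true]
      · exact (ih true).cons_cons p
      · exact (ih true).cons p
    · simp only [pvKeep, h, if_false, Bool.false_eq_true]
      exact (ih flag).cons_cons p

theorem pvKeep_false_perm {α : Type} (E : α → Bool) (l : List α) :
    (pvKeep E l false).Perm
      (match l.filter E with
        | [] => l.filter (fun p => !E p)
        | e :: _ => e :: l.filter (fun p => !E p)) := by
  induction l with
  | nil => simp [pvKeep]
  | cons p t ih =>
    by_cases h : E p = true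
    · simp only [pvKeep, h, if_true, Bool.false_eq_true, if_false, List.filter_cons,
        Bool.not_true, pvKeep_true]
      exact List.Perm.refl _
    · have hne : (!E p) = true := by simp [h]
      simp only [pvKeep, h, Bool.false_eq_true, if_false, List.filter_cons]
      cases hf : t.filter E with
      | nil => simp only [hf] at ih ⊢; exact ih.cons p
      | cons e rest =>
        simp only [hf] at ih ⊢
        exact (ih.cons p).trans (List.Perm.swap e p _)

theorem pvAny_append (excl : PySem.Set String) (acc : List String) (x : String) :
    excl.any (fun ex_item => (acc ++ [x]).contains ex_item)
      = (excl.any (fun ex_item => acc.contains ex_item) || PySem.Set.contains excl x) := by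
  rw [Bool.eq_iff_iff]
  simp [PySem.Set.contains, List.contains_eq_mem]
  constructor
  · rintro ⟨e, he, h | rfl⟩
    · exact Or.inl ⟨e, he, h⟩
    · exact Or.inr he
  · rintro (⟨e, he, h⟩ | hx)
    · exact ⟨e, he, Or.inl h⟩
    · exact ⟨x, hx, Or.inr rfl⟩

-- A's selected-names loop, characterised through pvKeep
theorem pvFold_keep (excl : PySem.Set String) (l : List (String × List (String × Int)))
    (acc : List String) :
    l.foldl (fun selected item =>
      if PySem.Set.contains excl item.1 then
        if !(excl.any (fun ex_item => selected.contains ex_item)) then selected ++ [item.1]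
        else selected
      else selected ++ [item.1]) acc
    = acc ++ (pvKeep (fun p => PySem.Set.contains excl p.1) l
        (excl.any (fun ex_item => acc.contains ex_item))).map Prod.fst := by
  induction l generalizing acc with
  | nil => simp [pvKeep]
  | cons p t ih =>
    simp only [List.foldl_cons]
    by_cases hE : PySem.Set.contains excl p.1 = true
    · by_cases hf : excl.any (fun ex_item => acc.contains ex_item) = true
      · simp only [hE, if_true, hf, Bool.not_true, Bool.false_eq_true, if_false]
        rw [ih acc]
        simp only [pvKeep, hE, hf, if_true]
      · have hf' : excl.any (fun ex_item => acc.contains ex_item) = false :=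
          Bool.eq_false_iff.mpr hf
        simp only [hE, if_true, hf', Bool.not_false]
        rw [ih (acc ++ [p.1])]
        rw [pvAny_append, hf', hE]
        simp only [pvKeep, hE, if_true, Bool.false_eq_true, if_false, Bool.false_or,
          List.map_cons, List.append_assoc, List.singleton_append]
    · have hE' : PySem.Set.contains excl p.1 = false := Bool.eq_false_iff.mpr hE
      simp only [hE', Bool.false_eq_true, if_false]
      rw [ih (acc ++ [p.1])]
      rw [pvAny_append, hE']
      simp only [pvKeep, hE', Bool.false_eq_true, if_false, Bool.or_false,
        List.map_cons, List.append_assoc, List.singleton_append]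

theorem pvDescEq (l1 l2 : List Int) (h1 : l1.Pairwise (fun a b => b ≤ a))
    (h2 : l2.Pairwise (fun a b => b ≤ a)) (hp : l1.Perm l2) : l1 = l2 :=
  List.eq_of_perm_of_sorted (fun _ _ _ _ hab hba => le_antisymm hba hab) h1 h2 hp

-- the value list A's dedup leaves, read off against B's pool, is B's pool sorted descending
theorem pvCore {α : Type} (E : α → Bool) (f : α → Int) (li : List α) :
    (pvKeep E (PySem.List.sorted li f true) false).map f
      = PySem.List.sorted
          (match PySem.List.max? ((li.filter E).map f) (fun v => v) with
            | some m => (li.filter (fun p => !E p)).map f ++ [m]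
            | none => (li.filter (fun p => !E p)).map f)
          (fun v => v) true := by
  have hSperm : (PySem.List.sorted li f true).Perm li := PySem.List.sorted_perm li f true
  have hSpair : (PySem.List.sorted li f true).Pairwise (fun a b => f b ≤ f a) :=
    PySem.List.sorted_pairwise_rev li f
  have hKpair : ((pvKeep E (PySem.List.sorted li f true) false).map f).Pairwise
      (fun a b : Int => b ≤ a) := by
    rw [List.pairwise_map]
    exact hSpair.sublist (pvKeep_sublist E _ false)
  have hfpermE : ((PySem.List.sorted li f true).filter E).Perm (li.filter E) := hSperm.filter E
  have hfpermN : ((PySem.List.sorted li f true).filter (fun p => !E p)).Perm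
      (li.filter (fun p => !E p)) := hSperm.filter _
  have hKperm := pvKeep_false_perm E (PySem.List.sorted li f true)
  cases hm : PySem.List.max? ((li.filter E).map f) (fun v => v) with
  | none =>
    have hnil : (li.filter E).map f = [] := (PySem.List.max?_eq_none_iff _ _).mp hm
    have hnil' : li.filter E = [] := List.map_eq_nil_iff.mp hnil
    have hSnil : (PySem.List.sorted li f true).filter E = [] := by
      have := hnil' ▸ hfpermE
      exact this.eq_nil
    rw [hSnil] at hKperm
    apply pvDescEq _ _ hKpair (PySem.List.sorted_pairwise_rev _ _)
    exact ((hKperm.map f).trans (hfpermN.map f)).trans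
      (PySem.List.sorted_perm _ _ true).symm
  | some m =>
    have hmem : m ∈ (li.filter E).map f := PySem.List.max?_mem hm
    have hmax : ∀ v ∈ (li.filter E).map f, v ≤ m := PySem.List.max?_isMax hm
    cases hS : (PySem.List.sorted li f true).filter E with
    | nil =>
      exfalso
      have : li.filter E = [] := (hS ▸ hfpermE).symm.eq_nil
      rw [this] at hmem
      simp at hmem
    | cons e rest =>
      rw [hS] at hKperm
      -- f e is the maximum of the excluded values
      have hEpair : ((PySem.List.sorted li f true).filter E).Pairwise (fun a b => f b ≤ f a) :=
        hSpair.sublist (List.filter_sublist)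
      rw [hS, List.pairwise_cons] at hEpair
      have hfe : f e = m := by
        have h1 : f e ≤ m := by
          apply hmax
          have : e ∈ li.filter E := hfpermE.subset (hS ▸ List.mem_cons_self ..)
          exact List.mem_map_of_mem this
        have h2 : m ≤ f e := by
          obtain ⟨q, hq, rfl⟩ := List.mem_map.mp hmem
          have : q ∈ (PySem.List.sorted li f true).filter E := hfpermE.symm.subset hq
          rw [hS] at this
          rcases List.mem_cons.mp this with rfl | hq'
          · exact le_refl _
          · exact hEpair.1 q hq'
        exact le_antisymm h1 h2
      apply pvDescEq _ _ hKpair (PySem.List.sorted_pairwise_rev _ _)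
      refine ((hKperm.map f).trans ?_).trans (PySem.List.sorted_perm _ _ true).symm
      rw [List.map_cons, hfe]
      exact ((List.perm_append_singleton m _).symm.trans
        (List.Perm.append_right [m] (hfpermN.map f))).symm.symm

-- per-stat equality
theorem pvStat_eq (league_items : List (String × List (String × Int)))
    (initial_stats : List (String × Int)) (stat : String)
    (hnd : (league_items.map Prod.fst).Nodup) :
    (let sorted_items := PySem.List.sorted league_items (fun item => PySem.Dict.getD (PySem.Dict.mk item.2) stat 0) true
    let excluded_items : PySem.Set String := PySem.Set.ofList ["Mortal Reminder", "Black Cleaver", "Lord Dominik's Regards"]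
    let selected_items := sorted_items.foldl (fun selected item =>
      if PySem.Set.contains excluded_items item.1 then
        if !(excluded_items.any (fun ex_item => selected.contains ex_item)) then selected ++ [item.1]
        else selected
      else selected ++ [item.1]) ([] : List String)
    let top_5_items := PySem.List.slice selected_items none (some 5)
    let total_value_from_items := (top_5_items.map (fun item =>
      let d := (PySem.Dict.get? (PySem.Dict.mk league_items) item).getD []
      if (PySem.Dict.mk d).contains stat then PySem.Dict.getD (PySem.Dict.mk d) stat 0 else 0)).sum
    total_value_from_items + PySem.Dict.getD (PySem.Dict.mk initial_stats) stat 0)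
    = pvStatTotal league_items initial_stats stat := by
  have hlk : ∀ p ∈ league_items,
      (if (PySem.Dict.mk ((PySem.Dict.get? (PySem.Dict.mk league_items) p.1).getD [])).contains stat
        then PySem.Dict.getD (PySem.Dict.mk ((PySem.Dict.get? (PySem.Dict.mk league_items) p.1).getD [])) stat 0
        else 0)
      = PySem.Dict.getD (PySem.Dict.mk p.2) stat 0 := by
    intro p hp
    have hg : PySem.Dict.get? (PySem.Dict.mk league_items) p.1 = some p.2 := by
      apply PySem.Dict.get?_of_mem_items
      · show (p.1, p.2) ∈ league_items
        simpa using hp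
      · show (league_items.map (·.1)).Nodup
        simpa using hnd
    rw [hg]
    by_cases hc : (PySem.Dict.mk p.2).contains stat = true
    · simp only [Option.getD_some, hc, if_true]
    · have hc' := Bool.eq_false_iff.mpr hc
      simp only [Option.getD_some, hc', Bool.false_eq_true, if_false]
      exact (PySem.Dict.getD_of_not_contains _ _ hc').symm
  unfold pvStatTotal pvExcludedB pvKeep
  dsimp only
  rw [pvFold_keep]
  have h0 : ((PySem.Set.ofList ["Mortal Reminder", "Black Cleaver", "Lord Dominik's Regards"] : PySem.Set String).any
      (fun ex_item => ([] : List String).contains ex_item)) = false := rfl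
  rw [h0, List.nil_append]
  have hslice : ∀ {β : Type} (xs : List β), PySem.List.slice xs none (some 5) = xs.take 5 := by
    intro β xs
    rw [PySem.List.slice_to xs (by norm_num : (0:Int) ≤ 5)]
    rfl
  rw [hslice, hslice]
  congr 1
  rw [← List.map_take, List.map_map]
  have step : ∀ (K : List (String × List (String × Int))), (∀ p ∈ K, p ∈ league_items) →
      List.map ((fun item =>
          if (PySem.Dict.mk ((PySem.Dict.get? (PySem.Dict.mk league_items) item).getD [])).contains stat
          then PySem.Dict.getD (PySem.Dict.mk ((PySem.Dict.get? (PySem.Dict.mk league_items) item).getD [])) stat 0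
          else 0) ∘ Prod.fst) K
        = List.map (fun p => PySem.Dict.getD (PySem.Dict.mk p.2) stat 0) K :=
    fun K hK => List.map_congr_left (fun p hp => hlk p (hK p hp))
  rw [step _ (fun p hp =>
    (PySem.List.mem_sorted _ _ _ _).mp ((pvKeep_sublist _ _ _).subset (List.mem_of_mem_take hp)))]
  rw [List.map_take, pvCore]

-- ===== VERDICT (by name: the statement is the Claim_ definition above) =====
theorem top_items_for_stats_spec : Claim_equal_top_items_for_stats := by
  intro league_items initial_stats _ hpre
  unfold Spec_top_items_for_stats top_items_for_stats top_items_for_stats_alt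
  rw [PySem.List.foldl_append_singleton_eq_map]
  simp only [List.nil_append]
  exact List.map_congr_left (fun stat _ => pvStat_eq league_items initial_stats stat hpre)
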